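-- pv_equiv track=rewrite | github.com/GDSC-Hanyang/Algorithm-1- | 조선빈/Lv.1/나머지가 1이 되는 수 찾기.py | solution
-- ===== SOURCE A (Python) =====
-- def solution(n):
--     answer = 0
--     List = []
--     for x in range(1,n+1):
--         if n%x == 1:
--             List.append(x)
--     answer = List[0]
--     return answer
-- ===== SOURCE B (Python) =====
-- def solution(n):
--     # Smallest x with n % x == 1 is the smallest divisor > 1 of m = n - 1,
--     # found by trial division up to sqrt(m); if none, m itself (m is prime).
--     m = n - 1
--     x = 2
--     while x * x <= m:
--         if m % x == 0:
--             return x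
--         x += 1
--     return m
-- ===== Notes on version B (the rewrite author's own statement) =====
-- stated objective: faster
-- what changed: Instead of scanning every x in 1..n and collecting those with n%x==1, B trial-divides m=n-1 by x=2,3,... up to sqrt(m) and returns the first divisor found (or m itself, which is then prime), since the answer is exactly the smallest divisor >1 of n-1.
import Mathlib
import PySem

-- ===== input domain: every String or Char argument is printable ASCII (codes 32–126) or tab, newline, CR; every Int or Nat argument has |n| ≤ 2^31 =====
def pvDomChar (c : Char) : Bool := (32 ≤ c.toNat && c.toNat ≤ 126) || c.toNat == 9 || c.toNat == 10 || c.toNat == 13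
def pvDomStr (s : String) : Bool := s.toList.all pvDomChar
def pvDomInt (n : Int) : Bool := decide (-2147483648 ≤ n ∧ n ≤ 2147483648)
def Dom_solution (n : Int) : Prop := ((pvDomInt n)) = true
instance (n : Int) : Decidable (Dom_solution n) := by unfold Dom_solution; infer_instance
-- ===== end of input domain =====

-- B replaces A's full scan of 1..n with trial division of m = n-1 up to sqrt(m)
-- (the answer is the smallest divisor > 1 of n-1): faster (O(sqrt n) vs O(n)).

-- ===== PORT A =====
def solution (n : Int) : Int :=
  -- answer = 0; List = []; for x in range(1, n+1): if n % x == 1: List.append(x)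
  let L : List Int := (PySem.List.pyRange 1 (n + 1) 1).foldl
      (fun acc x => if PySem.Int.mod n x == 1 then acc ++ [x] else acc) []
  -- answer = List[0]  (IndexError when L = [], excluded by Pre_solution)
  (PySem.List.pyGet? L 0).getD 0

-- ===== PORT B =====
-- while x * x <= m: if m % x == 0: return x; x += 1 — then return m
def tdLoop (m x : Int) : Int :=
  if _h : x * x ≤ m then
    if PySem.Int.mod m x == 0 then x else tdLoop m (x + 1)
  else m
termination_by (m + 1 - x).toNat
decreasing_by
  have hx : x ≤ x * x := by nlinarith [sq_nonneg (2 * x - 1)]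
  omega

def solution_alt (n : Int) : Int :=
  tdLoop (n - 1) 2

-- ===== PRECONDITION & SPEC =====
-- Pre_ excludes exactly the inputs where A raises: for n ≤ 2 no x in 1..n has
-- n % x == 1, so A's List is empty and List[0] raises IndexError.
def Pre_solution (n : Int) : Prop := 3 ≤ n
instance (n : Int) : Decidable (Pre_solution n) := by unfold Pre_solution; infer_instance
def pvWitness_solution : Int := 7
def Spec_solution (n : Int) (out : Int) : Prop := out = solution_alt n
instance (n : Int) (out : Int) : Decidable (Spec_solution n out) := by unfold Spec_solution; infer_instance

-- ===== CLAIM (what is proved, stated in full; the proofs are below) =====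
def Claim_equal_solution : Prop := ∀ (n : Int), Dom_solution n → Pre_solution n → Spec_solution n (solution n)

-- ===== LEMMAS AND PROOFS =====

-- head of the filter of an increasing range is the least element satisfying p
theorem head_filter_pyRange (p : Int → Bool) :
    ∀ (N : Nat) (a b k : Int), (b - a).toNat ≤ N → a ≤ k → k < b → p k = true →
      (∀ j, a ≤ j → j < k → p j = false) →
      ((PySem.List.pyRange a b 1).filter p).head? = some k := by
  intro N
  induction N with
  | zero => intro a b k hN hak hkb _ _; omega
  | succ N ih =>
    intro a b k hN hak hkb hpk hmin
    have hab : a < b := by omega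
    rw [PySem.List.pyRange_one_cons hab]
    by_cases hpa : p a = true
    · have hka : a = k := by
        by_contra hne
        have : p a = false := hmin a le_rfl (by omega)
        simp [this] at hpa
      subst hka
      simp [List.filter, hpa]
    · have hka : a ≠ k := fun h => hpa (h ▸ hpk)
      simp only [List.filter, hpa]
      exact ih (a + 1) b k (by omega) (by omega) hkb hpk
        (fun j h1 h2 => hmin j (by omega) h2)

-- n % x == 1 characterised via divisibility of n - 1 (for 1 ≤ x)
theorem mod_eq_one_iff (n x : Int) (hx : 1 ≤ x) :
    (PySem.Int.mod n x == 1) = true ↔ (2 ≤ x ∧ x ∣ n - 1) := by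
  rw [PySem.Int.mod_eq_emod_of_pos (show (0:Int) < x by omega)]
  constructor
  · intro h
    have h1 : n % x = 1 := by simpa using h
    have hx2 : 2 ≤ x := by
      by_contra h2
      have : x = 1 := by omega
      subst this; simp at h1
    refine ⟨hx2, ⟨n / x, ?_⟩⟩
    have := Int.ediv_add_emod n x
    omega
  · rintro ⟨hx2, ⟨q, hq⟩⟩
    have : n = 1 + x * q := by omega
    rw [this, Int.add_mul_emod_self_left, Int.emod_eq_of_lt (by omega) (by omega)]
    simp

-- the minimal divisor > 1 of m (2 ≤ m), as an Int
theorem minFac_facts (m : Int) (hm : 2 ≤ m) :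
    2 ≤ ((m.toNat.minFac : Int)) ∧ ((m.toNat.minFac : Int)) ∣ m ∧
      ((m.toNat.minFac : Int)) ≤ m ∧
      (∀ j : Int, 2 ≤ j → j ∣ m → ((m.toNat.minFac : Int)) ≤ j) := by
  have hm2 : 2 ≤ m.toNat := by omega
  have hne1 : m.toNat ≠ 1 := by omega
  have hpr := Nat.minFac_prime hne1
  have h2 : 2 ≤ m.toNat.minFac := hpr.two_le
  have hdvd : m.toNat.minFac ∣ m.toNat := Nat.minFac_dvd _
  have hmEq : ((m.toNat : Int)) = m := Int.toNat_of_nonneg (by omega)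
  refine ⟨by exact_mod_cast h2, ?_, ?_, ?_⟩
  · rw [← hmEq]; exact_mod_cast hdvd
  · calc ((m.toNat.minFac : Int)) ≤ ((m.toNat : Int)) := by
          exact_mod_cast Nat.minFac_le (by omega)
      _ = m := hmEq
  · intro j hj hjd
    have hjd' : j.toNat ∣ m.toNat := by
      rw [← hmEq] at hjd
      exact_mod_cast (Int.toNat_of_nonneg (by omega : (0:Int) ≤ j)) ▸ hjd
    have := Nat.minFac_le_of_dvd (by omega) hjd'
    omega

-- B's trial-division loop computes the minimal divisor > 1 of m
theorem tdLoop_eq_minFac :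
    ∀ (N : Nat) (m x : Int), (m + 1 - x).toNat ≤ N → 2 ≤ m → 2 ≤ x →
      (∀ k : Int, 2 ≤ k → k < x → ¬ k ∣ m) →
      tdLoop m x = ((m.toNat.minFac : Int)) := by
  intro N
  induction N with
  | zero =>
    intro m x hN hm hx hinv
    rw [tdLoop]
    have hno : ¬ x * x ≤ m := by
      intro h
      have : x ≤ m := by nlinarith
      omega
    simp only [dif_neg hno]
    obtain ⟨h2, hdvd, hle, hmin⟩ := minFac_facts m hm
    exact absurd hdvd (hinv _ h2 (by omega))
  | succ N ih =>
    intro m x hN hm hx hinv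
    obtain ⟨h2, hdvd, hle, hmin⟩ := minFac_facts m hm
    have hge : x ≤ ((m.toNat.minFac : Int)) := by
      by_contra h
      exact hinv _ h2 (by omega) hdvd
    rw [tdLoop]
    by_cases hsq : x * x ≤ m
    · simp only [dif_pos hsq]
      by_cases hdx : (PySem.Int.mod m x == 0) = true
      · rw [if_pos hdx]
        have hxd : x ∣ m := (PySem.Int.mod_eq_zero_iff_dvd m x).mp (by simpa using hdx)
        have := hmin x hx hxd
        omega
      · rw [if_neg hdx]
        refine ih m (x + 1) (by omega) hm (by omega) ?_
        intro k hk2 hkx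
        by_cases hkx' : k < x
        · exact hinv k hk2 hkx'
        · have : k = x := by omega
          subst this
          intro hkd
          have : PySem.Int.mod m k = 0 := (PySem.Int.mod_eq_zero_iff_dvd m k).mpr hkd
          simp [this] at hdx
    · simp only [dif_neg hsq]
      -- here m is prime: its minFac equals m
      by_contra hne
      have hlt : ((m.toNat.minFac : Int)) < m := lt_of_le_of_ne hle (by omega)
      set c : Int := ((m.toNat.minFac : Int)) with hc
      obtain ⟨d, hd⟩ := hdvd
      have hd2 : 2 ≤ d := by nlinarith
      have hdd : d ∣ m := ⟨c, by rw [hd]; ring⟩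
      have hcd : c ≤ d := hmin d hd2 hdd
      have h1 : x * x ≤ c * c := mul_le_mul hge hge (by omega) (by omega)
      have h2' : c * c ≤ c * d := mul_le_mul_of_nonneg_left hcd (by omega)
      have : ¬ m < x * x := by
        intro h; rw [hd] at h; linarith
      exact absurd (by omega : m < x * x) this

-- A's scan yields the minimal divisor > 1 of n-1 as first element
theorem solution_eq_minFac (n : Int) (hn : 3 ≤ n) :
    solution n = (((n - 1).toNat.minFac : Int)) := by
  obtain ⟨h2, hdvd, hle, hmin⟩ := minFac_facts (n - 1) (by omega)
  set c : Int := (((n - 1).toNat.minFac : Int)) with hc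
  have hfold : ((PySem.List.pyRange 1 (n + 1) 1).foldl
      (fun acc x => if PySem.Int.mod n x == 1 then acc ++ [x] else acc) []) =
      [] ++ (PySem.List.pyRange 1 (n + 1) 1).filter (fun x => PySem.Int.mod n x == 1) := by
    have := PySem.List.foldl_append_if (fun x : Int => PySem.Int.mod n x == 1)
      (id : Int → Int) (PySem.List.pyRange 1 (n + 1) 1) ([] : List Int)
    simpa using this
  have hhead : ((PySem.List.pyRange 1 (n + 1) 1).filter
      (fun x => PySem.Int.mod n x == 1)).head? = some c := by
    refine head_filter_pyRange _ n.toNat 1 (n + 1) c (by omega)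
      (by omega) (by omega) ?_ ?_
    · exact (mod_eq_one_iff n c (by omega)).mpr ⟨h2, hdvd⟩
    · intro j h1j hjc
      by_contra hpj
      have hpj' : (PySem.Int.mod n j == 1) = true := by
        cases h : (PySem.Int.mod n j == 1) <;> simp [h] at hpj ⊢
      obtain ⟨hj2, hjd⟩ := (mod_eq_one_iff n j h1j).mp hpj'
      have := hmin j hj2 hjd
      omega
  show (PySem.List.pyGet? _ 0).getD 0 = c
  rw [hfold]
  simp only [List.nil_append]
  rw [PySem.List.pyGet?_zero]
  rw [← List.head?_eq_getElem?, hhead]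
  rfl

-- ===== VERDICT (by name: the statement is the Claim_ definition above) =====
theorem solution_spec : Claim_equal_solution := by
  intro n _ hpre
  have hn : 3 ≤ n := hpre
  unfold Spec_solution solution_alt
  rw [solution_eq_minFac n hn]
  exact (tdLoop_eq_minFac (n - 1 + 1 - 2).toNat (n - 1) 2 le_rfl (by omega) (by omega)
    (by intro k h1 h2; omega)).symm
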